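-- pv_equiv track=rewrite | github.com/IAmSoThirsty/Project-AI | .antigravity/agents/project_ai_agent.py | get_test_requirements
-- ===== SOURCE A (Python) =====
-- def get_test_requirements(affected_files: list[str]) -> list[str]:
--     """Determine which tests should be run based on affected files.
--
--     Args:
--         affected_files: Files that were modified
--
--     Returns:
--         List of test commands to run
--     """
--     test_commands = []
--
--     # Check file categories
--     has_core_changes = any("src/app/core/" in f for f in affected_files)
--     has_gui_changes = any("src/app/gui/" in f for f in affected_files)
--     has_temporal_changes = any(
--         "temporal/" in f or "src/app/temporal/" in f for f in affected_files
--     )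
--
--     if has_core_changes:
--         test_commands.append("pytest tests/test_ai_systems.py -v")
--         test_commands.append("pytest tests/test_user_manager.py -v")
--
--     if has_temporal_changes:
--         test_commands.append("pytest tests/temporal/ -v")
--
--     # Always run full test suite as final check
--     test_commands.append("pytest tests/ -v --cov=src/")
--
--     return test_commands
-- ===== SOURCE B (Python) =====
-- def get_test_requirements(affected_files: list[str]) -> list[str]:
--     """Single pass over affected_files setting flags, then build the command list.
--
--     "temporal/" in f already covers "src/app/temporal/" in f, so one check suffices;
--     the unused gui scan is dropped.
--     """
--     has_core = False
--     has_temporal = False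
--     for f in affected_files:
--         if "src/app/core/" in f:
--             has_core = True
--         if "temporal/" in f:
--             has_temporal = True
--     cmds = []
--     if has_core:
--         cmds.append("pytest tests/test_ai_systems.py -v")
--         cmds.append("pytest tests/test_user_manager.py -v")
--     if has_temporal:
--         cmds.append("pytest tests/temporal/ -v")
--     cmds.append("pytest tests/ -v --cov=src/")
--     return cmds
-- ===== Notes on version B (the rewrite author's own statement) =====
-- stated objective: faster
-- what changed: Replaces the three separate any() scans with one pass accumulating two boolean flags, drops the unused gui scan, and folds the redundant 'src/app/temporal/' check into the 'temporal/' substring test it is subsumed by.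
import Mathlib
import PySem

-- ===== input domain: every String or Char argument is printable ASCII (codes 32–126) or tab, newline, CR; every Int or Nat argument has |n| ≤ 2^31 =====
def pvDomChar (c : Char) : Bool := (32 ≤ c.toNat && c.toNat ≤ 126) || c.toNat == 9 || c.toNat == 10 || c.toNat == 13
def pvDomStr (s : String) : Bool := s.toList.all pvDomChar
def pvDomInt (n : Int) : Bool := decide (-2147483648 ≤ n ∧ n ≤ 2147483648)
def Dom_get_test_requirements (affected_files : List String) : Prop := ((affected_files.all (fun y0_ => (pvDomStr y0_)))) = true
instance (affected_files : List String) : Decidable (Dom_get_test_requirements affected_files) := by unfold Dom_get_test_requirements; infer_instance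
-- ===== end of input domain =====

-- B replaces A's three separate any() scans by one single-pass flag fold and a subsumed substring check (simpler; same O(n) cost).


-- ===== PORT A =====
def get_test_requirements (affected_files : List String) : List String :=
  let test_commands : List String := []
  let has_core_changes := affected_files.any (fun f => PySem.Str.isIn "src/app/core/" f)
  let _has_gui_changes := affected_files.any (fun f => PySem.Str.isIn "src/app/gui/" f)
  let has_temporal_changes := affected_files.any
    (fun f => PySem.Str.isIn "temporal/" f || PySem.Str.isIn "src/app/temporal/" f)
  let test_commands := if has_core_changes then
      test_commands ++ ["pytest tests/test_ai_systems.py -v"] ++ ["pytest tests/test_user_manager.py -v"]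
    else test_commands
  let test_commands := if has_temporal_changes then
      test_commands ++ ["pytest tests/temporal/ -v"]
    else test_commands
  test_commands ++ ["pytest tests/ -v --cov=src/"]

-- ===== PORT B =====
def get_test_requirements_alt (affected_files : List String) : List String :=
  let flags := affected_files.foldl
    (fun (st : Bool × Bool) f =>
      (st.1 || PySem.Str.isIn "src/app/core/" f, st.2 || PySem.Str.isIn "temporal/" f))
    (false, false)
  let cmds : List String := []
  let cmds := if flags.1 then
      cmds ++ ["pytest tests/test_ai_systems.py -v"] ++ ["pytest tests/test_user_manager.py -v"]
    else cmds
  let cmds := if flags.2 then cmds ++ ["pytest tests/temporal/ -v"] else cmds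
  cmds ++ ["pytest tests/ -v --cov=src/"]

-- ===== PRECONDITION & SPEC =====
def Spec_get_test_requirements (affected_files : List String) (out : List String) : Prop := out = get_test_requirements_alt affected_files
instance (affected_files : List String) (out : List String) : Decidable (Spec_get_test_requirements affected_files out) := by unfold Spec_get_test_requirements; infer_instance

-- ===== CLAIM (what is proved, stated in full; the proofs are below) =====
def Claim_equal_get_test_requirements : Prop := ∀ (affected_files : List String), Dom_get_test_requirements affected_files → Spec_get_test_requirements affected_files (get_test_requirements affected_files)

-- ===== LEMMAS AND PROOFS =====

-- The single-pass flag fold computes the same two booleans as A's separate any-scans.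
theorem flags_eq (fs : List String) (a b : Bool) :
    fs.foldl (fun (st : Bool × Bool) f =>
      (st.1 || PySem.Str.isIn "src/app/core/" f, st.2 || PySem.Str.isIn "temporal/" f)) (a, b)
    = (a || fs.any (fun f => PySem.Str.isIn "src/app/core/" f),
       b || fs.any (fun f => PySem.Str.isIn "temporal/" f)) := by
  induction fs generalizing a b with
  | nil => simp
  | cons f fs ih =>
    rw [List.foldl_cons, ih]
    simp [Bool.or_assoc]

-- "src/app/temporal/" in f implies "temporal/" in f, so A's disjunction collapses to B's single check.
theorem temporal_subsumed (f : String) :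
    (PySem.Str.isIn "temporal/" f || PySem.Str.isIn "src/app/temporal/" f)
    = PySem.Str.isIn "temporal/" f := by
  cases h : PySem.Str.isIn "src/app/temporal/" f with
  | false => simp
  | true =>
    have h1 : ("temporal/").toList <:+: ("src/app/temporal/").toList := by decide
    have h2 := (PySem.Str.isIn_iff_infix "src/app/temporal/" f).mp h
    have h3 : PySem.Str.isIn "temporal/" f = true :=
      (PySem.Str.isIn_iff_infix "temporal/" f).mpr (h1.trans h2)
    rw [h3]; rfl

-- ===== VERDICT (by name: the statement is the Claim_ definition above) =====
theorem get_test_requirements_spec : Claim_equal_get_test_requirements := by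
  intro fs _
  unfold Spec_get_test_requirements get_test_requirements get_test_requirements_alt
  simp only [flags_eq, Bool.false_or, temporal_subsumed]
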